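-- pv_equiv track=rewrite | github.com/francocontigo/dbguide | dbguide/app/safety.py | extract_sql_block
-- ===== SOURCE A (Python) =====
-- def extract_sql_block(raw: str) -> str:
--     """Extract the content between the [SQL] tag and the next section.
--
--     If a [SQL] section is not found, return the full raw text.
--     """
--     if not raw:
--         return ""
--
--     lower = raw.lower()
--     start = lower.find("[sql]")
--     if start == -1:
--         return raw.strip()
--
--     after = raw[start + len("[SQL]") :]
--
--     next_markers = ["[explicacao]", "[checks]"]
--     end_positions = []
--     for m in next_markers:
--         p = after.lower().find(m)
--         if p != -1:
--             end_positions.append(p)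
--     end = min(end_positions) if end_positions else len(after)
--
--     return after[:end].strip()
-- ===== SOURCE B (Python) =====
-- def extract_sql_block(raw: str) -> str:
--     """Extract the content between the [SQL] tag and the next section.
--
--     Single fused left-to-right scan: lower the text once, then walk the tail
--     checking both section markers at each position, instead of one find() pass
--     per marker followed by min().
--     """
--     if not raw:
--         return ""
--
--     low = raw.lower()
--     i = low.find("[sql]")
--     if i == -1:
--         return raw.strip()
--
--     body = raw[i + 5:]
--     tail = low[i + 5:]
--     end = len(tail)
--     for p in range(len(tail)):
--         if tail.startswith("[explicacao]", p) or tail.startswith("[checks]", p):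
--             end = p
--             break
--     return body[:end].strip()
-- ===== Notes on version B (the rewrite author's own statement) =====
-- stated objective: alternative
-- what changed: Replaces the per-marker find() passes plus min() index arithmetic with one fused left-to-right scan of the lowered tail that checks both section markers at each position and stops at the first hit.
import Mathlib
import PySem

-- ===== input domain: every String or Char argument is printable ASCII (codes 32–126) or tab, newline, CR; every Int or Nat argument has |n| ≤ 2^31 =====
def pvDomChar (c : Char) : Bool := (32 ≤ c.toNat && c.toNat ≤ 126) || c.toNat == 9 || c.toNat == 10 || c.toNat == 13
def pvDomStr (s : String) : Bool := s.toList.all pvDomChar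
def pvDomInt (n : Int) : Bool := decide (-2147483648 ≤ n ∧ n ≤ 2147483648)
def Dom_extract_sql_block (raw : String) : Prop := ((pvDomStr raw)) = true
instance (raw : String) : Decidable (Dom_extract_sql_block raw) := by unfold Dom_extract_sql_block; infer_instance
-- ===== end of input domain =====

-- B replaces A's per-marker find() passes plus min() index arithmetic with one fused
-- left-to-right scan of the lowered tail that stops at the first marker hit (alternative
-- decomposition, same cost).

-- ===== PORT A =====
def extract_sql_block (raw : String) : String :=
  if raw = "" then "" else
    let lower := PySem.Chars.lower raw.toList
    let start := PySem.Chars.find lower "[sql]".toList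
    if start = -1 then PySem.Str.strip raw else
      let after := PySem.List.slice raw.toList (some (start + 5)) none
      let nextMarkers : List String := ["[explicacao]", "[checks]"]
      let endPositions := nextMarkers.foldl (fun acc m =>
        let p := PySem.Chars.find (PySem.Chars.lower after) m.toList
        if p ≠ -1 then acc ++ [p] else acc) ([] : List Int)
      let e : Int := match PySem.List.min? endPositions id with
        | some v => v
        | none => (after.length : Int)
      String.ofList (PySem.Chars.strip (PySem.List.slice after none (some e)))

-- ===== PORT B =====
-- first position of the scanned tail where either section marker starts; tail length if none
def sqlScan : List Char → Nat
  | [] => 0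
  | c :: rest =>
      if PySem.Chars.startswith (c :: rest) "[explicacao]".toList
         || PySem.Chars.startswith (c :: rest) "[checks]".toList then 0
      else sqlScan rest + 1

def extract_sql_block_alt (raw : String) : String :=
  if raw = "" then "" else
    let low := PySem.Chars.lower raw.toList
    let i := PySem.Chars.find low "[sql]".toList
    if i = -1 then PySem.Str.strip raw else
      let body := PySem.List.slice raw.toList (some (i + 5)) none
      let tail := PySem.List.slice low (some (i + 5)) none
      let e := sqlScan tail
      String.ofList (PySem.Chars.strip (PySem.List.slice body none (some (e : Int))))

-- ===== PRECONDITION & SPEC =====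
def Spec_extract_sql_block (raw : String) (out : String) : Prop := out = extract_sql_block_alt raw
instance (raw : String) (out : String) : Decidable (Spec_extract_sql_block raw out) := by unfold Spec_extract_sql_block; infer_instance

-- ===== CLAIM (what is proved, stated in full; the proofs are below) =====
def Claim_equal_extract_sql_block : Prop := ∀ (raw : String), Dom_extract_sql_block raw → Spec_extract_sql_block raw (extract_sql_block raw)

-- ===== LEMMAS AND PROOFS =====

-- a section marker starts at position j of cs
def pvHit (cs : List Char) (j : Nat) : Prop :=
  "[explicacao]".toList <+: cs.drop j ∨ "[checks]".toList <+: cs.drop j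

theorem sqlScan_spec (cs : List Char) :
    sqlScan cs ≤ cs.length ∧ (∀ j, j < sqlScan cs → ¬ pvHit cs j) ∧
      (sqlScan cs = cs.length ∨ pvHit cs (sqlScan cs)) := by
  induction cs with
  | nil => exact ⟨Nat.le_refl 0, fun j hj => absurd hj (Nat.not_lt_zero j), Or.inl rfl⟩
  | cons c rest ih =>
    obtain ⟨ih1, ih2, ih3⟩ := ih
    by_cases h : (PySem.Chars.startswith (c :: rest) "[explicacao]".toList
        || PySem.Chars.startswith (c :: rest) "[checks]".toList) = true
    · have hs : sqlScan (c :: rest) = 0 := by rw [sqlScan]; exact if_pos h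
      refine ⟨by omega, ?_, ?_⟩
      · intro j hj; rw [hs] at hj; exact absurd hj (Nat.not_lt_zero j)
      · right; rw [hs]
        rcases Bool.or_eq_true_iff.mp h with h1 | h1
        · exact Or.inl ((PySem.Chars.startswith_iff _ _).mp h1)
        · exact Or.inr ((PySem.Chars.startswith_iff _ _).mp h1)
    · have hs : sqlScan (c :: rest) = sqlScan rest + 1 := by rw [sqlScan]; exact if_neg h
      have hstep : ∀ k, pvHit (c :: rest) (k + 1) ↔ pvHit rest k := by
        intro k; simp [pvHit]
      refine ⟨by rw [hs, List.length_cons]; omega, ?_, ?_⟩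
      · intro j hj
        rw [hs] at hj
        match j with
        | 0 =>
          intro hhit
          apply h
          rcases hhit with h1 | h1
          · exact Bool.or_eq_true_iff.mpr (Or.inl ((PySem.Chars.startswith_iff _ _).mpr h1))
          · exact Bool.or_eq_true_iff.mpr (Or.inr ((PySem.Chars.startswith_iff _ _).mpr h1))
        | Nat.succ k =>
          exact (hstep k).not.mpr (ih2 k (by omega))
      · rcases ih3 with h3 | h3
        · exact Or.inl (by simp [hs, h3])
        · right; rw [hs]; exact (hstep _).mpr h3

theorem pvFirst_uniq (cs : List Char) (n₁ n₂ : Nat)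
    (h₁ : n₁ ≤ cs.length ∧ (∀ j, j < n₁ → ¬ pvHit cs j) ∧ (n₁ = cs.length ∨ pvHit cs n₁))
    (h₂ : n₂ ≤ cs.length ∧ (∀ j, j < n₂ → ¬ pvHit cs j) ∧ (n₂ = cs.length ∨ pvHit cs n₂)) :
    n₁ = n₂ := by
  by_contra hne
  rcases Nat.lt_or_ge n₁ n₂ with hlt | hge
  · rcases h₁.2.2 with he | hh
    · omega
    · exact h₂.2.1 n₁ hlt hh
  · have hlt : n₂ < n₁ := by omega
    rcases h₂.2.2 with he | hh
    · omega
    · exact h₁.2.1 n₂ hlt hh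

theorem pv_no_hit_of_find_neg (cs sub : List Char) (h : PySem.Chars.find cs sub = -1) :
    ∀ j, ¬ sub <+: cs.drop j := by
  intro j hp
  have hin : PySem.Chars.isIn sub cs = true :=
    (PySem.Chars.exists_prefix_drop_iff_isIn sub cs).mp ⟨j, hp⟩
  exact (PySem.Chars.find_eq_neg_one_iff cs sub).mp h ((PySem.Chars.isIn_iff_infix sub cs).mp hin)

theorem pvA_end_spec (cs : List Char) :
    let f1 := PySem.Chars.find cs "[explicacao]".toList
    let f2 := PySem.Chars.find cs "[checks]".toList
    let e : Int := match PySem.List.min?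
        ((if f1 ≠ -1 then [f1] else []) ++ (if f2 ≠ -1 then [f2] else [])) id with
      | some v => v
      | none => (cs.length : Int)
    e.toNat ≤ cs.length ∧ (∀ j, j < e.toNat → ¬ pvHit cs j) ∧
      (e.toNat = cs.length ∨ pvHit cs e.toNat) := by
  intro f1 f2 e
  have hf1 := PySem.Chars.neg_one_le_find cs "[explicacao]".toList
  have hf2 := PySem.Chars.neg_one_le_find cs "[checks]".toList
  have hl1 := PySem.Chars.find_le_length cs "[explicacao]".toList
  have hl2 := PySem.Chars.find_le_length cs "[checks]".toList
  by_cases h1 : f1 = -1 <;> by_cases h2 : f2 = -1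
  · have he : e = (cs.length : Int) := by
      simp only [e]; rw [if_neg (not_not_intro h1), if_neg (not_not_intro h2)]; rfl
    have n1 := pv_no_hit_of_find_neg cs _ h1
    have n2 := pv_no_hit_of_find_neg cs _ h2
    refine ⟨by simp [he], ?_, Or.inl (by simp [he])⟩
    intro j _ hh
    rcases hh with hh | hh
    · exact n1 j hh
    · exact n2 j hh
  · have hpos2 : 0 ≤ f2 := by omega
    have he : e = f2 := by
      simp only [e]; rw [if_neg (not_not_intro h1), if_pos h2]; rfl
    obtain ⟨hp2, hmin2⟩ := PySem.Chars.find_spec hpos2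
    have n1 := pv_no_hit_of_find_neg cs _ h1
    refine ⟨by rw [he]; omega, ?_, Or.inr (by rw [he]; exact Or.inr hp2)⟩
    intro j hj hh
    rcases hh with hh | hh
    · exact n1 j hh
    · exact hmin2 j (by rw [he] at hj; exact hj) hh
  · have hpos1 : 0 ≤ f1 := by omega
    have he : e = f1 := by
      simp only [e]; rw [if_pos h1, if_neg (not_not_intro h2)]; simp [PySem.List.min?]
    obtain ⟨hp1, hmin1⟩ := PySem.Chars.find_spec hpos1
    have n2 := pv_no_hit_of_find_neg cs _ h2
    refine ⟨by rw [he]; omega, ?_, Or.inr (by rw [he]; exact Or.inl hp1)⟩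
    intro j hj hh
    rcases hh with hh | hh
    · exact hmin1 j (by rw [he] at hj; exact hj) hh
    · exact n2 j hh
  · have hpos1 : 0 ≤ f1 := by omega
    have hpos2 : 0 ≤ f2 := by omega
    have he : e = if f2 < f1 then f2 else f1 := by
      simp only [e]; rw [if_pos h1, if_pos h2]
      by_cases hc : f2 < f1 <;> simp [PySem.List.min?, hc]
    obtain ⟨hp1, hmin1⟩ := PySem.Chars.find_spec hpos1
    obtain ⟨hp2, hmin2⟩ := PySem.Chars.find_spec hpos2
    by_cases hc : f2 < f1
    · have he2 : e = f2 := by rw [he, if_pos hc]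
      refine ⟨by rw [he2]; omega, ?_, Or.inr (by rw [he2]; exact Or.inr hp2)⟩
      intro j hj hh
      rw [he2] at hj
      rcases hh with hh | hh
      · exact hmin1 j (by omega) hh
      · exact hmin2 j hj hh
    · have he1 : e = f1 := by rw [he, if_neg hc]
      refine ⟨by rw [he1]; omega, ?_, Or.inr (by rw [he1]; exact Or.inl hp1)⟩
      intro j hj hh
      rw [he1] at hj
      rcases hh with hh | hh
      · exact hmin1 j hj hh
      · exact hmin2 j (by omega) hh

theorem pv_end_eq (cs : List Char) :
    (match PySem.List.min?
        ((if PySem.Chars.find cs "[explicacao]".toList ≠ -1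
            then [PySem.Chars.find cs "[explicacao]".toList] else []) ++
         (if PySem.Chars.find cs "[checks]".toList ≠ -1
            then [PySem.Chars.find cs "[checks]".toList] else [])) id with
      | some v => v
      | none => (cs.length : Int)) = (sqlScan cs : Int) := by
  have hf1 := PySem.Chars.neg_one_le_find cs "[explicacao]".toList
  have hf2 := PySem.Chars.neg_one_le_find cs "[checks]".toList
  have heq := pvFirst_uniq cs _ _ (pvA_end_spec cs) (sqlScan_spec cs)
  have hnn : 0 ≤ (match PySem.List.min?
        ((if PySem.Chars.find cs "[explicacao]".toList ≠ -1
            then [PySem.Chars.find cs "[explicacao]".toList] else []) ++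
         (if PySem.Chars.find cs "[checks]".toList ≠ -1
            then [PySem.Chars.find cs "[checks]".toList] else [])) id with
      | some v => v
      | none => (cs.length : Int)) := by
    by_cases h1 : PySem.Chars.find cs "[explicacao]".toList = -1 <;>
      by_cases h2 : PySem.Chars.find cs "[checks]".toList = -1
    · rw [if_neg (not_not_intro h1), if_neg (not_not_intro h2)]
      exact Int.natCast_nonneg _
    · rw [if_neg (not_not_intro h1), if_pos h2]; show 0 ≤ PySem.Chars.find cs _; omega
    · rw [if_pos h1, if_neg (not_not_intro h2)]
      have : PySem.List.min? ([PySem.Chars.find cs "[explicacao]".toList] ++ []) id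
          = some (PySem.Chars.find cs "[explicacao]".toList) := by simp [PySem.List.min?]
      rw [this]; show 0 ≤ PySem.Chars.find cs _; omega
    · rw [if_pos h1, if_pos h2]
      by_cases hc : PySem.Chars.find cs "[checks]".toList < PySem.Chars.find cs "[explicacao]".toList
      · have : PySem.List.min? ([PySem.Chars.find cs "[explicacao]".toList] ++
            [PySem.Chars.find cs "[checks]".toList]) id
            = some (PySem.Chars.find cs "[checks]".toList) := by
          rw [show ∀ a b : Int, PySem.List.min? ([a] ++ [b]) id
              = if b < a then some b else some a from fun a b => rfl, if_pos hc]
        rw [this]; show 0 ≤ PySem.Chars.find cs _; omega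
      · have : PySem.List.min? ([PySem.Chars.find cs "[explicacao]".toList] ++
            [PySem.Chars.find cs "[checks]".toList]) id
            = some (PySem.Chars.find cs "[explicacao]".toList) := by
          rw [show ∀ a b : Int, PySem.List.min? ([a] ++ [b]) id
              = if b < a then some b else some a from fun a b => rfl, if_neg hc]
        rw [this]; show 0 ≤ PySem.Chars.find cs _; omega
  omega

theorem pvFold_eq (cs : List Char) :
    (["[explicacao]", "[checks]"] : List String).foldl (fun acc m =>
        let p := PySem.Chars.find cs m.toList
        if p ≠ -1 then acc ++ [p] else acc) ([] : List Int)
    = (if PySem.Chars.find cs "[explicacao]".toList ≠ -1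
          then [PySem.Chars.find cs "[explicacao]".toList] else []) ++
      (if PySem.Chars.find cs "[checks]".toList ≠ -1
          then [PySem.Chars.find cs "[checks]".toList] else []) := by
  simp only [List.foldl]
  split_ifs <;> simp_all

theorem pvTail_eq (R : List Char) (a : Int) (h : 0 ≤ a) :
    PySem.List.slice (PySem.Chars.lower R) (some a) none
      = PySem.Chars.lower (PySem.List.slice R (some a) none) := by
  rw [PySem.List.slice_from _ h, PySem.List.slice_from _ h, PySem.Chars.lower,
    PySem.Chars.lower, List.map_drop]

theorem pvLowerLen (cs : List Char) : (PySem.Chars.lower cs).length = cs.length := by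
  simp [PySem.Chars.lower]

-- ===== VERDICT (by name: the statement is the Claim_ definition above) =====
theorem extract_sql_block_spec : Claim_equal_extract_sql_block := by
  intro raw _
  unfold Spec_extract_sql_block
  simp only [extract_sql_block, extract_sql_block_alt]
  by_cases hraw : raw = ""
  · rw [if_pos hraw, if_pos hraw]
  · rw [if_neg hraw, if_neg hraw]
    by_cases hneg : PySem.Chars.find (PySem.Chars.lower raw.toList) "[sql]".toList = -1
    · rw [if_pos hneg, if_pos hneg]
    · rw [if_neg hneg, if_neg hneg]
      have hi := PySem.Chars.neg_one_le_find (PySem.Chars.lower raw.toList) "[sql]".toList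
      have hnn : (0:Int) ≤ PySem.Chars.find (PySem.Chars.lower raw.toList) "[sql]".toList + 5 := by
        omega
      rw [pvFold_eq, pvTail_eq _ _ hnn,
        show (PySem.List.slice raw.toList
            (some (PySem.Chars.find (PySem.Chars.lower raw.toList) "[sql]".toList + 5)) none).length
          = (PySem.Chars.lower (PySem.List.slice raw.toList
            (some (PySem.Chars.find (PySem.Chars.lower raw.toList) "[sql]".toList + 5)) none)).length
          from (pvLowerLen _).symm,
        pv_end_eq]
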